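-- pv_equiv track=rewrite | github.com/lansetianhuo/test | huawei_intf_status.py | data_section
-- ===== SOURCE A (Python) =====
-- def data_section(data):
--     section = data.split('\n')
--     data_list = []
--     data_setc_list = []
--
--     for data in section:
--         if data != '' and not data.startswith('<') and not data.startswith('['):
--             data_setc_list.append(data)
--         else:
--             data_list.append(data_setc_list)
--             data_setc_list = []
--     return data_list
-- ===== SOURCE B (Python) =====
-- def data_section(data):
--     def is_delim(s):
--         return s == '' or s.startswith('<') or s.startswith('[')
--
--     def go(lines):
--         group = []
--         i = 0
--         while i < len(lines) and not is_delim(lines[i]):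
--             group.append(lines[i])
--             i += 1
--         if i == len(lines):
--             return []
--         return [group] + go(lines[i + 1:])
--
--     return go(data.split('\n'))
-- ===== Notes on version B (the rewrite author's own statement) =====
-- stated objective: alternative
-- what changed: B replaces A's single accumulator loop carrying a pending-group list with a span-based recursion: take the run of content lines as a group, drop the delimiter line, recurse on the remaining suffix (trailing content after the last delimiter is dropped because no delimiter terminates it).
import Mathlib
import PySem

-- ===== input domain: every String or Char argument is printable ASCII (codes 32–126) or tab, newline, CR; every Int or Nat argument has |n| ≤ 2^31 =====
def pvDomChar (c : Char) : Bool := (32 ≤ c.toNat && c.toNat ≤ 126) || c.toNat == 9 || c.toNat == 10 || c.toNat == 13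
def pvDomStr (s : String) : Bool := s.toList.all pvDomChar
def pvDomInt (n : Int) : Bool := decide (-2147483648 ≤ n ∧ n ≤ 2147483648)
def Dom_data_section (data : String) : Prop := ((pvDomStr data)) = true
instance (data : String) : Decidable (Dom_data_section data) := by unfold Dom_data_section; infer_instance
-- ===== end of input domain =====

-- B groups the lines by a span/suffix recursion (take the content run, drop the
-- delimiter, recurse on the rest) instead of A's single accumulator loop; objective: alternative.

-- ===== PORT A =====
-- literal port of A: one pass, pair state (data_list, data_setc_list)
def data_section (data : String) : List (List String) :=
  let sec := (PySem.Str.split? data "\n").getD []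
  (sec.foldl
    (fun (st : List (List String) × List String) d =>
      if d != "" && !PySem.Str.startswith d "<" && !PySem.Str.startswith d "[" then
        (st.1, st.2 ++ [d])
      else
        (st.1 ++ [st.2], []))
    ([], [])).1

-- ===== PORT B =====
def pvIsDelim (s : String) : Bool :=
  s == "" || PySem.Str.startswith s "<" || PySem.Str.startswith s "["

-- B's inner while loop is a span: group = takeWhile content, the rest = dropWhile
def dsGo (lines : List String) : List (List String) :=
  let grp := lines.takeWhile (fun s => !pvIsDelim s)
  match h : lines.dropWhile (fun s => !pvIsDelim s) with
  | [] => []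
  | _ :: rest => grp :: dsGo rest
termination_by lines.length
decreasing_by
  have hle := List.length_dropWhile_le (p := fun s => !pvIsDelim s) (l := lines)
  rw [h] at hle
  simp at hle
  omega

def data_section_alt (data : String) : List (List String) :=
  dsGo ((PySem.Str.split? data "\n").getD [])

-- ===== PRECONDITION & SPEC =====
def Spec_data_section (data : String) (out : List (List String)) : Prop := out = data_section_alt data
instance (data : String) (out : List (List String)) : Decidable (Spec_data_section data out) := by unfold Spec_data_section; infer_instance

-- ===== CLAIM (what is proved, stated in full; the proofs are below) =====
def Claim_equal_data_section : Prop := ∀ (data : String), Dom_data_section data → Spec_data_section data (data_section data)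

-- ===== LEMMAS AND PROOFS =====

-- prepend `cur` onto the first group, if any
def mapFirstCons (cur : List String) : List (List String) → List (List String)
  | [] => []
  | g :: gs => (cur ++ g) :: gs

lemma mapFirstCons_nil (l : List (List String)) : mapFirstCons [] l = l := by
  cases l <;> simp [mapFirstCons]

lemma mapFirstCons_comp (c d : List String) (l : List (List String)) :
    mapFirstCons c (mapFirstCons d l) = mapFirstCons (c ++ d) l := by
  cases l <;> simp [mapFirstCons]

lemma content_eq_not_delim (d : String) :
    (d != "" && !PySem.Str.startswith d "<" && !PySem.Str.startswith d "[") = !pvIsDelim d := by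
  unfold pvIsDelim
  cases h1 : d == "" <;> cases h2 : PySem.Str.startswith d "<" <;>
    cases h3 : PySem.Str.startswith d "[" <;> simp only [bne, h1, h2, h3] <;> rfl

lemma dsGo_nil : dsGo [] = [] := by
  rw [dsGo]; rfl

lemma dsGo_cons_content (l : String) (ls : List String) (h : pvIsDelim l = false) :
    dsGo (l :: ls) = mapFirstCons [l] (dsGo ls) := by
  have hdw : List.dropWhile (fun s => !pvIsDelim s) (l :: ls)
      = List.dropWhile (fun s => !pvIsDelim s) ls := by
    simp [List.dropWhile_cons, h]
  have htw : List.takeWhile (fun s => !pvIsDelim s) (l :: ls)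
      = l :: List.takeWhile (fun s => !pvIsDelim s) ls := by
    simp [List.takeWhile_cons, h]
  rw [dsGo, dsGo]
  split <;> rename_i heq1 <;> split <;> rename_i heq2 <;>
    rw [hdw] at heq1 <;> rw [heq2] at heq1
  · simp [mapFirstCons]
  · simp at heq1
  · simp at heq1
  · obtain ⟨-, hre⟩ := List.cons.inj heq1
    rw [htw]
    simp [mapFirstCons, hre]

lemma dsGo_cons_delim (l : String) (ls : List String) (h : pvIsDelim l = true) :
    dsGo (l :: ls) = [] :: dsGo ls := by
  have hdw : List.dropWhile (fun s => !pvIsDelim s) (l :: ls) = l :: ls := by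
    simp [List.dropWhile_cons, h]
  have htw : List.takeWhile (fun s => !pvIsDelim s) (l :: ls) = [] := by
    simp [List.takeWhile_cons, h]
  rw [dsGo]
  split <;> rename_i heq <;> rw [hdw] at heq
  · simp at heq
  · obtain ⟨-, hr⟩ := List.cons.inj heq
    rw [htw, ← hr]

lemma foldl_eq_dsGo (ls : List String) :
    ∀ (acc : List (List String)) (cur : List String),
      (ls.foldl
        (fun (st : List (List String) × List String) d =>
          if d != "" && !PySem.Str.startswith d "<" && !PySem.Str.startswith d "[" then
            (st.1, st.2 ++ [d])
          else
            (st.1 ++ [st.2], []))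
        (acc, cur)).1 = acc ++ mapFirstCons cur (dsGo ls) := by
  induction ls with
  | nil => intro acc cur; simp [dsGo_nil, mapFirstCons]
  | cons l ls ih =>
    intro acc cur
    rw [List.foldl_cons]
    simp only []
    cases h : pvIsDelim l with
    | false =>
      have hc : (l != "" && !PySem.Str.startswith l "<" && !PySem.Str.startswith l "[") = true := by
        rw [content_eq_not_delim, h]; rfl
      rw [hc, if_pos rfl, ih, dsGo_cons_content l ls h, mapFirstCons_comp]
    | true =>
      have hc : (l != "" && !PySem.Str.startswith l "<" && !PySem.Str.startswith l "[") = false := by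
        rw [content_eq_not_delim, h]; rfl
      rw [hc, if_neg (by simp), ih, dsGo_cons_delim l ls h, mapFirstCons_nil]
      simp [mapFirstCons]

-- ===== VERDICT (by name: the statement is the Claim_ definition above) =====
theorem data_section_spec : Claim_equal_data_section := by
  intro data _
  simp only [Spec_data_section, data_section, data_section_alt]
  rw [foldl_eq_dsGo, mapFirstCons_nil]
  simp
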